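-- pv_equiv track=rewrite | github.com/amomand/the-cabin | game/map.py | display_map
-- ===== SOURCE A (Python) =====
-- def display_map(visited_rooms: set) -> str:
--     """Display an ASCII map of visited areas.
--
--     Args:
--         visited_rooms: Set of room IDs the player has visited
--
--     Returns:
--         ASCII map string
--     """
--     # Define the room layout and connections
--     room_layout = [
--         ("wilderness_start", "The Wilderness"),
--         ("cabin_clearing", "The Clearing"),
--         ("cabin_main", "The Cabin"),
--         ("konttori", "Konttori"),
--         ("cabin_grounds_main", "Cabin Grounds"),
--         ("lakeside", "Lakeside"),
--         ("wood_track", "Wood Track"),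
--         ("old_woods", "Old Woods")
--     ]
--
--     # Special locations that use double pipes
--     special_locations = {"cabin_main", "konttori", "cabin_grounds_main"}
--
--     map_lines = []
--
--     for i, (room_id, room_name) in enumerate(room_layout):
--         # Only show visited rooms
--         if room_id not in visited_rooms:
--             continue
--
--         # Add room name
--         map_lines.append(room_name)
--
--         # Add connection to next room (if there is one and it's visited)
--         if i < len(room_layout) - 1:
--             next_room_id = room_layout[i + 1][0]
--             if next_room_id in visited_rooms:
--                 # Use double pipes ONLY when BOTH rooms are special locations
--                 if room_id in special_locations and next_room_id in special_locations:
--                     map_lines.append("||")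
--                 else:
--                     map_lines.append(" |")
--             else:
--                 # No connection if next room not visited
--                 map_lines.append("")
--         else:
--             # Last room has no connection
--             map_lines.append("")
--
--     # Filter out empty lines and join
--     map_lines = [line for line in map_lines if line.strip()]
--
--     return "\n".join(map_lines)
-- ===== SOURCE B (Python) =====
-- def display_map(visited_rooms: set) -> str:
--     """Display an ASCII map of visited areas.
--
--     Staged algorithm: extract the visited layout indices, group them into
--     maximal runs of consecutive indices, render each run as one string
--     (names interleaved with connector lines), and join the run strings.
--     """
--     ids = ["wilderness_start", "cabin_clearing", "cabin_main", "konttori",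
--            "cabin_grounds_main", "lakeside", "wood_track", "old_woods"]
--     names = ["The Wilderness", "The Clearing", "The Cabin", "Konttori",
--              "Cabin Grounds", "Lakeside", "Wood Track", "Old Woods"]
--
--     # Stage 1: indices of visited rooms, in layout order.
--     idx = [i for i in range(8) if ids[i] in visited_rooms]
--
--     # Stage 2: group into maximal runs of consecutive indices.
--     runs = []
--     for i in idx:
--         if runs and runs[-1][-1] == i - 1:
--             runs[-1].append(i)
--         else:
--             runs.append([i])
--
--     # Stage 3: render each run. The connector between consecutive rooms
--     # i and i+1 is "||" exactly when both are special, i.e. both indices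
--     # lie in {2,3,4}, i.e. i is 2 or 3.
--     def render(run):
--         s = names[run[0]]
--         for i in run[1:]:
--             conn = "||" if i - 1 in (2, 3) else " |"
--             s += "\n" + conn + "\n" + names[i]
--         return s
--
--     return "\n".join(render(r) for r in runs)
-- ===== Notes on version B (the rewrite author's own statement) =====
-- stated objective: alternative
-- what changed: B is a staged algorithm: it extracts the visited layout indices, groups them into maximal runs of consecutive indices, renders each run separately (names interleaved with connectors, '||' when the earlier index is 2 or 3), and joins the run strings, instead of A's single scan over the full table with empty-string placeholders stripped by a final filter.
import Mathlib
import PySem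

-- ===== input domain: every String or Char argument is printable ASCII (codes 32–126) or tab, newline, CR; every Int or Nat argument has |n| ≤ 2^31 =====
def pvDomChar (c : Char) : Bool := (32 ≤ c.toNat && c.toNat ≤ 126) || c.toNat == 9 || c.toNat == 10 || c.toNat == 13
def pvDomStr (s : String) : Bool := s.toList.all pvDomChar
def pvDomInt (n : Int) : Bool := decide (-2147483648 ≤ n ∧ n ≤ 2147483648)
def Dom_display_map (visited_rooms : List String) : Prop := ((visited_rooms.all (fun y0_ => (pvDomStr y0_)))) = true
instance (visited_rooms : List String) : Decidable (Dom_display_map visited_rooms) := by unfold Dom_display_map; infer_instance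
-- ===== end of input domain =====

-- B replaces A's table scan with placeholders + final strip by a staged algorithm:
-- extract visited indices, group them into maximal consecutive runs, render each run,
-- join the runs ("alternative"; same cost over the fixed 8-room layout).

-- ===== PORT A =====
def pvLayout : List (String × String) :=
  [("wilderness_start", "The Wilderness"),
   ("cabin_clearing", "The Clearing"),
   ("cabin_main", "The Cabin"),
   ("konttori", "Konttori"),
   ("cabin_grounds_main", "Cabin Grounds"),
   ("lakeside", "Lakeside"),
   ("wood_track", "Wood Track"),
   ("old_woods", "Old Woods")]

def pvSpecial : PySem.Set String :=
  PySem.Set.ofList ["cabin_main", "konttori", "cabin_grounds_main"]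

def display_map (visited_rooms : List String) : String :=
  let room_layout := pvLayout
  let special_locations := pvSpecial
  let map_lines : List String :=
    (PySem.List.enumerate room_layout).foldl (fun map_lines p =>
      let i := p.1
      let room_id := p.2.1
      let room_name := p.2.2
      if ¬ (PySem.Set.contains visited_rooms room_id) then map_lines
      else
        let map_lines := map_lines ++ [room_name]
        if i < PySem.List.len room_layout - 1 then
          let next_room_id := (PySem.List.pyGetD room_layout (i + 1) ("", "")).1
          if PySem.Set.contains visited_rooms next_room_id then
            if PySem.Set.contains special_locations room_id &&
               PySem.Set.contains special_locations next_room_id then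
              map_lines ++ ["||"]
            else
              map_lines ++ [" |"]
          else
            map_lines ++ [""]
        else
          map_lines ++ [""]) []
  let map_lines := map_lines.filter (fun line => PySem.Str.strip line ≠ "")
  PySem.Str.join "\n" map_lines

-- ===== PORT B =====
def pvIds : List String :=
  ["wilderness_start", "cabin_clearing", "cabin_main", "konttori",
   "cabin_grounds_main", "lakeside", "wood_track", "old_woods"]

def pvNames : List String :=
  ["The Wilderness", "The Clearing", "The Cabin", "Konttori",
   "Cabin Grounds", "Lakeside", "Wood Track", "Old Woods"]

-- Stage-3 helper of Source B: render one run of consecutive visited indices.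
-- (run[0] on the empty run would raise in Python; render is only ever called on
--  nonempty runs, the [] case here is unreachable.)
def pvRender (run : List Int) : String :=
  let s := PySem.List.pyGetD pvNames (PySem.List.pyGetD run 0 0) ""
  (run.drop 1).foldl (fun s i =>
    let conn := if i - 1 = 2 ∨ i - 1 = 3 then "||" else " |"
    s ++ "\n" ++ conn ++ "\n" ++ PySem.List.pyGetD pvNames i "") s

def display_map_alt (visited_rooms : List String) : String :=
  -- Stage 1: indices of visited rooms, in layout order.
  let idx : List Int :=
    (PySem.List.pyRange 0 8 1).filter
      (fun i => PySem.Set.contains visited_rooms (PySem.List.pyGetD pvIds i ""))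
  -- Stage 2: group into maximal runs of consecutive indices.
  let runs : List (List Int) :=
    idx.foldl (fun runs i =>
      match runs.getLast? with
      | some last =>
        if last.getLast? = some (i - 1) then runs.dropLast ++ [last ++ [i]]
        else runs ++ [[i]]
      | none => runs ++ [[i]]) []
  -- Stage 3: render each run and join.
  PySem.Str.join "\n" (runs.map pvRender)

-- ===== PRECONDITION & SPEC =====
def Spec_display_map (visited_rooms : List String) (out : String) : Prop := out = display_map_alt visited_rooms
instance (visited_rooms : List String) (out : String) : Decidable (Spec_display_map visited_rooms out) := by unfold Spec_display_map; infer_instance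

-- ===== CLAIM (what is proved, stated in full; the proofs are below) =====
def Claim_equal_display_map : Prop := ∀ (visited_rooms : List String), Dom_display_map visited_rooms → Spec_display_map visited_rooms (display_map visited_rooms)

-- ===== LEMMAS AND PROOFS =====

-- ===== VERDICT (by name: the statement is the Claim_ definition above) =====
set_option maxHeartbeats 4000000 in
theorem display_map_spec : Claim_equal_display_map := by
  intro vs _
  unfold Spec_display_map display_map display_map_alt
  by_cases h0 : "wilderness_start" ∈ vs <;>
  by_cases h1 : "cabin_clearing" ∈ vs <;>
  by_cases h2 : "cabin_main" ∈ vs <;>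
  by_cases h3 : "konttori" ∈ vs <;>
  by_cases h4 : "cabin_grounds_main" ∈ vs <;>
  by_cases h5 : "lakeside" ∈ vs <;>
  by_cases h6 : "wood_track" ∈ vs <;>
  by_cases h7 : "old_woods" ∈ vs <;>
    simp [pvLayout, pvSpecial, pvIds, pvNames, pvRender, PySem.List.enumerate, List.range_succ,
          PySem.List.pyGetD_ofNat', PySem.List.pyRange,
          h0, h1, h2, h3, h4, h5, h6, h7] <;> decide
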